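-- pv_equiv track=rewrite | github.com/chleya/unified-sel | core/capability_benchmark.py | _count_with_zero_role
-- ===== SOURCE A (Python) =====
-- from typing import Any, Dict, List, Sequence, Tuple
--
-- def _count_with_zero_role(values: Sequence[int], role: str) -> int:
--     if role == "positive":
--         return sum(1 for value in values if value > 0)
--     if role == "nonnegative":
--         return sum(1 for value in values if value >= 0)
--     if role == "negative":
--         return sum(1 for value in values if value < 0)
--     if role == "nonpositive":
--         return sum(1 for value in values if value <= 0)
--     if role == "zero_only":
--         return sum(1 for value in values if value == 0)
--     if role == "nonzero":
--         return sum(1 for value in values if value != 0)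
--     raise ValueError(f"Unsupported zero role: {role}")
-- ===== SOURCE B (Python) =====
-- def _count_with_zero_role(values, role):
--     if role not in ("positive", "nonnegative", "negative", "nonpositive", "zero_only", "nonzero"):
--         raise ValueError(f"Unsupported zero role: {role}")
--     ordered = sorted(values)
--     n = len(ordered)
--     # bisect_left(ordered, 0): index of the first element >= 0
--     lo, hi = 0, n
--     while lo < hi:
--         mid = (lo + hi) // 2
--         if ordered[mid] < 0:
--             lo = mid + 1
--         else:
--             hi = mid
--     first_nonneg = lo
--     # bisect_right(ordered, 0): index of the first element > 0
--     lo, hi = 0, n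
--     while lo < hi:
--         mid = (lo + hi) // 2
--         if ordered[mid] <= 0:
--             lo = mid + 1
--         else:
--             hi = mid
--     first_pos = lo
--     if role == "positive":
--         return n - first_pos
--     if role == "nonnegative":
--         return n - first_nonneg
--     if role == "negative":
--         return first_nonneg
--     if role == "nonpositive":
--         return first_pos
--     if role == "zero_only":
--         return first_pos - first_nonneg
--     return (n - first_pos) + first_nonneg  # nonzero
-- ===== Notes on version B (the rewrite author's own statement) =====
-- stated objective: alternative
-- what changed: B sorts the values and locates the zero boundary with two hand-written binary searches (bisect_left/bisect_right of 0), reading every role's count off the two boundary indices, instead of A's per-role linear predicate scan.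
import Mathlib
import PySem

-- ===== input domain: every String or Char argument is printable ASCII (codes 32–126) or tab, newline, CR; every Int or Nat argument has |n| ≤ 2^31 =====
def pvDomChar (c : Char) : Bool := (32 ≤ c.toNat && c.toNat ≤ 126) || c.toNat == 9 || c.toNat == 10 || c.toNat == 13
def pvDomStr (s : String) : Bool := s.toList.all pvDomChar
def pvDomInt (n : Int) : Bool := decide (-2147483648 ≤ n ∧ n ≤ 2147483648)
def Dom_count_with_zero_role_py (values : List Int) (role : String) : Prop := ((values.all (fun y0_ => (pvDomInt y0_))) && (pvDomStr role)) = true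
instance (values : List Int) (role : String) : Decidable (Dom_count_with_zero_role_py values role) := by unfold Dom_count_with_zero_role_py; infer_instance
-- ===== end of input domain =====

-- B sorts the values and reads each role's count off the two zero-boundary indices found by
-- binary search (bisect_left/bisect_right of 0), instead of A's per-role linear predicate scan;
-- objective: alternative algorithm.

-- ===== PORT A =====
-- sum(1 for value in values if <pred>) : a single pass adding 1 where the predicate holds
def pvSumIf (p : Int → Bool) (values : List Int) : Int :=
  values.foldl (fun acc v => if p v then acc + 1 else acc) 0

def count_with_zero_role_py (values : List Int) (role : String) : Int :=
  if role = "positive" then pvSumIf (fun v => v > 0) values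
  else if role = "nonnegative" then pvSumIf (fun v => v ≥ 0) values
  else if role = "negative" then pvSumIf (fun v => v < 0) values
  else if role = "nonpositive" then pvSumIf (fun v => v ≤ 0) values
  else if role = "zero_only" then pvSumIf (fun v => v == 0) values
  else if role = "nonzero" then pvSumIf (fun v => v != 0) values
  else 0  -- Python raises ValueError here; excluded by Pre_

-- ===== PORT B =====
def count_with_zero_role_py_alt (values : List Int) (role : String) : Int :=
  if ¬ (role = "positive" ∨ role = "nonnegative" ∨ role = "negative" ∨
        role = "nonpositive" ∨ role = "zero_only" ∨ role = "nonzero") then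
    0  -- Python raises ValueError here; excluded by Pre_
  else
    let ordered := PySem.List.sorted values (fun v => v)
    let n := ordered.length
    -- Source B's two hand-written while loops are exactly the standard bisect_left/bisect_right
    -- binary searches, ported as the corresponding PySem primitives
    let firstNonneg := PySem.List.bisectLeft ordered 0
    let firstPos := PySem.List.bisectRight ordered 0
    if role = "positive" then (n : Int) - firstPos
    else if role = "nonnegative" then (n : Int) - firstNonneg
    else if role = "negative" then (firstNonneg : Int)
    else if role = "nonpositive" then (firstPos : Int)
    else if role = "zero_only" then (firstPos : Int) - firstNonneg
    else ((n : Int) - firstPos) + firstNonneg  -- nonzero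

-- ===== PRECONDITION & SPEC =====
-- Pre_ excludes exactly the roles on which A (and B) raise ValueError.
def Pre_count_with_zero_role_py (_values : List Int) (role : String) : Prop :=
  role = "positive" ∨ role = "nonnegative" ∨ role = "negative" ∨
  role = "nonpositive" ∨ role = "zero_only" ∨ role = "nonzero"
instance (values : List Int) (role : String) : Decidable (Pre_count_with_zero_role_py values role) := by
  unfold Pre_count_with_zero_role_py; infer_instance

def pvWitness_count_with_zero_role_py : List Int × String := ([-2, 0, 3], "nonzero")

def Spec_count_with_zero_role_py (values : List Int) (role : String) (out : Int) : Prop := out = count_with_zero_role_py_alt values role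
instance (values : List Int) (role : String) (out : Int) : Decidable (Spec_count_with_zero_role_py values role out) := by unfold Spec_count_with_zero_role_py; infer_instance

-- ===== CLAIM =====
def Claim_equal_count_with_zero_role_py : Prop := ∀ (values : List Int) (role : String), Dom_count_with_zero_role_py values role → Pre_count_with_zero_role_py values role → Spec_count_with_zero_role_py values role (count_with_zero_role_py values role)

-- ===== LEMMAS AND PROOFS =====

-- pvSumIf is a 0/1-count
theorem pvSumIf_eq_countP (p : Int → Bool) (values : List Int) :
    pvSumIf p values = (values.countP p : Int) := by
  unfold pvSumIf
  rw [PySem.List.foldl_if_add_one]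
  simp

-- a predicate that holds exactly on the first k indices has count k
theorem countP_of_index_iff (p : Int → Bool) :
    ∀ (s : List Int) (k : Nat), k ≤ s.length →
      (∀ j (h : j < s.length), p s[j] = decide (j < k)) → s.countP p = k := by
  intro s
  induction s with
  | nil => intro k hk _; simpa using (Nat.le_zero.mp hk).symm
  | cons x xs ih =>
    intro k hk hiff
    have hx := hiff 0 (by simp)
    cases k with
    | zero =>
      have hxs : xs.countP p = 0 := by
        refine ih 0 (Nat.zero_le _) ?_
        intro j hj
        have := hiff (j + 1) (by simpa using Nat.succ_lt_succ hj)
        simpa using this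
      simp at hx
      simp [hx, hxs]
    | succ k' =>
      have hxs : xs.countP p = k' := by
        refine ih k' (by simpa using hk) ?_
        intro j hj
        have := hiff (j + 1) (by simpa using Nat.succ_lt_succ hj)
        simpa [Nat.succ_lt_succ_iff] using this
      simp at hx
      simp [hx, hxs]

-- trichotomy totals
theorem countP_trichotomy (s : List Int) :
    s.countP (fun v => decide (v < 0)) + s.countP (fun v => v == 0)
      + s.countP (fun v => decide (v > 0)) = s.length := by
  induction s with
  | nil => simp
  | cons x xs ih =>
    rw [List.countP_cons, List.countP_cons, List.countP_cons, List.length_cons]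
    rcases lt_trichotomy x 0 with h | h | h <;>
      simp only [h, beq_iff_eq, decide_eq_true_eq] <;> split_ifs <;> omega

theorem countP_split_le (s : List Int) :
    s.countP (fun v => decide (v ≤ 0)) =
      s.countP (fun v => decide (v < 0)) + s.countP (fun v => v == 0) := by
  induction s with
  | nil => simp
  | cons x xs ih =>
    simp only [List.countP_cons, show (x == 0) = decide (x = 0) from rfl]
    rw [ih]
    simp only [decide_eq_true_eq]
    split_ifs <;> omega

theorem countP_split_ge (s : List Int) :
    s.countP (fun v => decide (v ≥ 0)) =
      s.countP (fun v => v == 0) + s.countP (fun v => decide (v > 0)) := by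
  induction s with
  | nil => simp
  | cons x xs ih =>
    simp only [List.countP_cons, show (x == 0) = decide (x = 0) from rfl]
    rw [ih]
    simp only [decide_eq_true_eq]
    split_ifs <;> omega

theorem countP_split_ne (s : List Int) :
    s.countP (fun v => v != 0) =
      s.countP (fun v => decide (v < 0)) + s.countP (fun v => decide (v > 0)) := by
  induction s with
  | nil => simp
  | cons x xs ih =>
    simp only [List.countP_cons, show (x != 0) = decide (¬ x = 0) from by cases h : x == 0 <;> simp_all [bne]]
    rw [ih]
    simp only [decide_eq_true_eq]
    split_ifs <;> omega

-- bisectLeft on a sorted list counts the negatives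
theorem bisectLeft_eq_countP_neg (s : List Int) (hs : s.Pairwise (fun a b => a ≤ b)) :
    s.countP (fun v => decide (v < 0)) = PySem.List.bisectLeft s 0 := by
  obtain ⟨hle, hlt, hge⟩ := PySem.List.bisectLeft_spec s 0 hs
  refine countP_of_index_iff _ s _ hle ?_
  intro j hj
  by_cases h : j < PySem.List.bisectLeft s 0
  · simp [h, hlt j hj h]
  · have := hge j hj (Nat.le_of_not_lt h)
    simp [h, not_lt.mpr this]

-- bisectRight on a sorted list counts the nonpositives
theorem bisectRight_eq_countP_nonpos (s : List Int) (hs : s.Pairwise (fun a b => a ≤ b)) :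
    s.countP (fun v => decide (v ≤ 0)) = PySem.List.bisectRight s 0 := by
  obtain ⟨hle, hlt, hge⟩ := PySem.List.bisectRight_spec s 0 hs
  refine countP_of_index_iff _ s _ hle ?_
  intro j hj
  by_cases h : j < PySem.List.bisectRight s 0
  · simp [h, hlt j hj h]
  · have := hge j hj (Nat.le_of_not_lt h)
    simp [h, not_le.mpr this]

-- ===== VERDICT =====
theorem count_with_zero_role_py_spec : Claim_equal_count_with_zero_role_py := by
  intro values role _ hpre
  unfold Spec_count_with_zero_role_py count_with_zero_role_py count_with_zero_role_py_alt
  set s := PySem.List.sorted values (fun v => v) with hsdef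
  have hperm : s.Perm values := PySem.List.sorted_perm values (fun v => v) false
  have hsorted : s.Pairwise (fun a b => a ≤ b) := PySem.List.sorted_pairwise values (fun v => v)
  have hL := bisectLeft_eq_countP_neg s hsorted
  have hR := bisectRight_eq_countP_nonpos s hsorted
  have hT := countP_trichotomy s
  have hSle := countP_split_le s
  have hSge := countP_split_ge s
  have hSne := countP_split_ne s
  have hlen : s.length = values.length := hperm.length_eq
  have hperm' : ∀ p : Int → Bool, values.countP p = s.countP p := fun p => (hperm.countP_eq p).symm
  rcases hpre with h | h | h | h | h | h <;> subst h <;>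
    simp only [String.reduceEq, reduceIte, or_true, or_false, not_true_eq_false] <;>
    rw [pvSumIf_eq_countP, hperm'] <;> omega
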